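-- pv_equiv track=rewrite | github.com/A-stick-bug/geeksforgeeks | 2023-6-18 Ticket Counter.py | distributeTicket
-- ===== SOURCE A (Python) =====
-- def distributeTicket(N : int, K : int) -> int:
--     nums = range(N)
--     start, end = 0, N-1
--     while end > start:
--         for i in range(K):
--             if end <= start:
--                 return nums[start]+1
--             start += 1
--
--         for i in range(K):
--             if end <= start:
--                 return nums[start]+1
--             end -= 1
--     return nums[start]+1
-- ===== SOURCE B (Python) =====
-- def distributeTicket(N: int, K: int) -> int:
--     # Closed form: the final pointer position equals the number of left-side
--     # moves among the N-1 total moves, taken in alternating blocks of K.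
--     if N <= 1:
--         return 1
--     q, r = divmod(N - 1, K)
--     left = K * ((q + 1) // 2) + (r if q % 2 == 0 else 0)
--     return left + 1
-- ===== Notes on version B (the rewrite author's own statement) =====
-- stated objective: faster
-- what changed: Replaced the two-pointer simulation loop by a closed-form div/mod computation of the number of left-side moves among the N-1 alternating K-blocks.
import Mathlib
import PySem

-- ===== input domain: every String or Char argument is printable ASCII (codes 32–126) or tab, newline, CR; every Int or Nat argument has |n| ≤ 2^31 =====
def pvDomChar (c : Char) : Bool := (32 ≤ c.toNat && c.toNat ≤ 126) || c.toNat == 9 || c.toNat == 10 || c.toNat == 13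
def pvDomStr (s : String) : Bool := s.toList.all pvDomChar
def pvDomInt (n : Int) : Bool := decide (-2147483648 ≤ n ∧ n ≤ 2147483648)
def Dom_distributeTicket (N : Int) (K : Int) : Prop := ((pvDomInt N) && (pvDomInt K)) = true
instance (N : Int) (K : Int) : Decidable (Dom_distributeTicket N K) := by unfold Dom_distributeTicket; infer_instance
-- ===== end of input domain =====

-- B replaces A's two-pointer simulation loop by a closed-form div/mod computation.

-- ===== PORT A =====
-- 'for i in range(K): if end <= start: return nums[start]+1; start += 1'
-- either early-returns the final start index (inl) or yields the advanced start (inr)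
def pvALeft : Nat → Int → Int → Sum Int Int
  | 0, s, _ => .inr s
  | n+1, s, e => if e ≤ s then .inl s else pvALeft n (s+1) e

-- the second for loop, decrementing end; inl = early-returned start index
def pvARight : Nat → Int → Int → Sum Int Int
  | 0, _, e => .inr e
  | n+1, s, e => if e ≤ s then .inl s else pvARight n s (e-1)

-- 'while end > start': fuel bounds the iteration count only (on inputs
-- satisfying Pre_ the fuel N.toNat+1 is never exhausted)
def pvALoop : Nat → Int → Int → Int → Int
  | 0, _, s, _ => s
  | f+1, K, s, e =>
    if e > s then
      match pvALeft K.toNat s e with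
      | .inl r => r
      | .inr s' =>
        match pvARight K.toNat s' e with
        | .inl r => r
        | .inr e' => pvALoop f K s' e'
    else s

-- nums = range(N); the loop yields the final start; nums[start]+1
-- (pyGet?: none = IndexError, excluded by Pre_)
def distributeTicket (N : Int) (K : Int) : Int :=
  (PySem.List.pyGet? (PySem.List.pyRange 0 N 1)
    (pvALoop (N.toNat + 1) K 0 (N - 1))).getD 0 + 1

-- ===== PORT B =====
def distributeTicket_alt (N : Int) (K : Int) : Int :=
  if N ≤ 1 then 1
  else
    let q := PySem.Int.floordiv (N - 1) K
    let r := PySem.Int.mod (N - 1) K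
    let left := K * PySem.Int.floordiv (q + 1) 2 +
      (if PySem.Int.mod q 2 = 0 then r else 0)
    left + 1

-- ===== PRECONDITION & SPEC =====
-- Pre_ admits exactly the inputs on which A returns: for N ≤ 0 A raises
-- IndexError (range(N)[0]), and for N ≥ 2 with K ≤ 0 A's while loop never
-- terminates.
def Pre_distributeTicket (N : Int) (K : Int) : Prop := 1 ≤ N ∧ (1 ≤ K ∨ N = 1)
instance (N : Int) (K : Int) : Decidable (Pre_distributeTicket N K) := by unfold Pre_distributeTicket; infer_instance
def pvWitness_distributeTicket : Int × Int := (7, 2)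

def Spec_distributeTicket (N : Int) (K : Int) (out : Int) : Prop := out = distributeTicket_alt N K
instance (N : Int) (K : Int) (out : Int) : Decidable (Spec_distributeTicket N K out) := by unfold Spec_distributeTicket; infer_instance

-- ===== CLAIM (what is proved, stated in full; the proofs are below) =====
def Claim_equal_distributeTicket : Prop := ∀ (N : Int) (K : Int), Dom_distributeTicket N K → Pre_distributeTicket N K → Spec_distributeTicket N K (distributeTicket N K)

-- ===== LEMMAS AND PROOFS =====

-- closed form for the number of left-pointer moves when the gap is g (proof helper)
def pvL (K g : Int) : Int :=
  if g ≤ 0 then 0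
  else K * PySem.Int.floordiv (PySem.Int.floordiv g K + 1) 2 +
    (if PySem.Int.mod (PySem.Int.floordiv g K) 2 = 0 then PySem.Int.mod g K else 0)

theorem pvALeft_char : ∀ (n : Nat) (s e : Int), 0 ≤ e - s →
    pvALeft n s e = if (n : Int) ≤ e - s then .inr (s + n) else .inl (max s e) := by
  intro n
  induction n with
  | zero => intro s e hse; simp [pvALeft]; omega
  | succ n ih =>
    intro s e hse
    by_cases h : e ≤ s
    · have he : e = s := by omega
      subst he
      simp [pvALeft]
    · rw [pvALeft, if_neg h, ih (s+1) e (by omega)]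
      push_cast
      by_cases h2 : (n : Int) + 1 ≤ e - s
      · rw [if_pos (by omega : (n : Int) ≤ e - (s+1)), if_pos h2]
        congr 1; ring
      · rw [if_neg (by omega : ¬ ((n : Int) ≤ e - (s+1))), if_neg h2]
        congr 1; omega

theorem pvARight_char : ∀ (n : Nat) (s e : Int), 0 ≤ e - s →
    pvARight n s e = if (n : Int) ≤ e - s then .inr (e - n) else .inl s := by
  intro n
  induction n with
  | zero => intro s e hse; simp [pvARight]; omega
  | succ n ih =>
    intro s e hse
    by_cases h : e ≤ s
    · have he : e = s := by omega
      subst he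
      simp [pvARight]
    · rw [pvARight, if_neg h, ih s (e-1) (by omega)]
      push_cast
      by_cases h2 : (n : Int) + 1 ≤ e - s
      · rw [if_pos (by omega : (n : Int) ≤ e - 1 - s), if_pos h2]
        congr 1; ring
      · rw [if_neg (by omega : ¬ ((n : Int) ≤ e - 1 - s)), if_neg h2]

-- pvL in Euclidean-division normal form (for 0 < g, 1 ≤ K floor = Euclidean)
theorem pvL_pos {K g : Int} (hK : 1 ≤ K) (h0 : 0 < g) :
    pvL K g = K * ((g / K + 1) / 2) + (if (g / K) % 2 = 0 then g % K else 0) := by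
  unfold pvL
  rw [if_neg (by omega), PySem.Int.floordiv_eq_ediv_of_pos (by omega : (0:Int) < K),
    PySem.Int.mod_eq_emod_of_pos (by omega : (0:Int) < K),
    PySem.Int.floordiv_eq_ediv_of_pos (by omega : (0:Int) < 2),
    PySem.Int.mod_eq_emod_of_pos (by omega : (0:Int) < 2)]

theorem pvL_small {K g : Int} (hK : 1 ≤ K) (h0 : 0 < g) (h : g < K) : pvL K g = g := by
  have hq : g / K = 0 := Int.ediv_eq_zero_of_lt (by omega) h
  have hr : g % K = g := Int.emod_eq_of_lt (by omega) h
  rw [pvL_pos hK h0, hq, hr]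
  norm_num

theorem pvL_mid {K g : Int} (hK : 1 ≤ K) (h0 : K ≤ g) (h : g < 2 * K) : pvL K g = K := by
  have hq : g / K = 1 := by
    have hg : g = (g - K) + 1 * K := by ring
    rw [hg, Int.add_mul_ediv_right _ _ (by omega : K ≠ 0),
      Int.ediv_eq_zero_of_lt (by omega) (by omega)]
    norm_num
  rw [pvL_pos hK (by omega), hq]
  norm_num

theorem pvL_step {K g : Int} (hK : 1 ≤ K) (h : 2 * K ≤ g) : pvL K g = K + pvL K (g - 2 * K) := by
  by_cases hz : g - 2 * K ≤ 0
  · have hg : g = 2 * K := by omega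
    have hz0 : pvL K (g - 2 * K) = 0 := by unfold pvL; rw [if_pos hz]
    have hq : g / K = 2 := by rw [hg]; exact Int.mul_ediv_cancel _ (by omega)
    have hr : g % K = 0 := by rw [hg, mul_comm, Int.mul_emod_right]
    rw [hz0, pvL_pos hK (by omega), hq, hr]
    norm_num
  · have hq2 : (g - 2 * K) / K = g / K - 2 := by
      have hgg : g - 2 * K = g + (-2) * K := by ring
      rw [hgg, Int.add_mul_ediv_right _ _ (by omega : K ≠ 0)]; ring
    have hr2 : (g - 2 * K) % K = g % K := by
      have hgg : g - 2 * K = g + (-2) * K := by ring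
      rw [hgg, Int.add_mul_emod_self_right]
    rw [pvL_pos hK (by omega), pvL_pos hK (by omega), hq2, hr2]
    have hpar : (g / K - 2) % 2 = g / K % 2 := by omega
    have hhalf : (g / K + 1) / 2 = (g / K - 2 + 1) / 2 + 1 := by omega
    rw [hpar, hhalf]
    ring

-- bounds: 0 ≤ pvL K g ≤ g for 0 ≤ g (strong induction on g.toNat)
theorem pvL_bounds (K : Int) (hK : 1 ≤ K) : ∀ n : Nat, ∀ g : Int, g.toNat = n → 0 ≤ g →
    0 ≤ pvL K g ∧ pvL K g ≤ g := by
  intro n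
  induction n using Nat.strong_induction_on with
  | _ n ih =>
    intro g hn hg
    by_cases h0 : g ≤ 0
    · have hg0 : g = 0 := by omega
      simp [pvL, hg0]
    · by_cases h1 : g < K
      · rw [pvL_small hK (by omega) h1]; omega
      · by_cases h2 : g < 2 * K
        · rw [pvL_mid hK (by omega) h2]; omega
        · rw [pvL_step hK (by omega)]
          have := ih (g - 2*K).toNat (by omega) (g - 2*K) rfl (by omega)
          omega

-- the while loop computes s + pvL K (e - s)
theorem pvALoop_eq (K : Int) (hK : 1 ≤ K) : ∀ fuel : Nat, ∀ s e : Int, e - s ≤ (fuel : Int) →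
    pvALoop fuel K s e = s + pvL K (e - s) := by
  intro fuel
  induction fuel with
  | zero =>
    intro s e h
    have h0 : e - s ≤ 0 := by push_cast at h; omega
    simp [pvALoop, pvL, h0]
  | succ f ih =>
    intro s e h
    have hKt : ((K.toNat : Int)) = K := Int.toNat_of_nonneg (by omega)
    by_cases hgt : e > s
    · rw [pvALoop, if_pos hgt, pvALeft_char K.toNat s e (by omega), hKt]
      by_cases hL : K ≤ e - s
      · rw [if_pos hL]
        show (match pvARight K.toNat (s + K) e with
          | .inl r => r
          | .inr e' => pvALoop f K (s + K) e') = s + pvL K (e - s)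
        rw [pvARight_char K.toNat (s + K) e (by omega), hKt]
        by_cases hR : K ≤ e - (s + K)
        · rw [if_pos hR]
          show pvALoop f K (s + K) (e - K) = s + pvL K (e - s)
          rw [ih (s + K) (e - K) (by push_cast at h ⊢; omega)]
          conv_rhs => rw [pvL_step hK (by omega : 2 * K ≤ e - s)]
          have harg : e - K - (s + K) = e - s - 2 * K := by ring
          rw [harg]
          ring
        · rw [if_neg hR]
          show s + K = s + pvL K (e - s)
          rw [pvL_mid hK hL (by omega)]
      · rw [if_neg hL]
        show max s e = s + pvL K (e - s)
        rw [pvL_small hK (by omega) (by omega)]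
        omega
    · rw [pvALoop, if_neg hgt]
      simp [pvL, (by omega : e - s ≤ 0)]

-- ===== VERDICT (by name: the statement is the Claim_ definition above) =====
theorem distributeTicket_spec : Claim_equal_distributeTicket := by
  intro N K _ hpre
  obtain ⟨hN, hK⟩ := hpre
  unfold Spec_distributeTicket
  by_cases h1 : N = 1
  · subst h1
    have hloop : pvALoop 2 K 0 0 = 0 := by
      rw [pvALoop, if_neg (by omega)]
    simp [distributeTicket, distributeTicket_alt, hloop, PySem.List.pyRange,
      PySem.List.pyGet?, PySem.List.pyIdx?]
  · have hK1 : 1 ≤ K := by tauto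
    have hN2 : 2 ≤ N := by omega
    have hb := pvL_bounds K hK1 (N - 1).toNat (N - 1) rfl (by omega)
    have hloop : pvALoop (N.toNat + 1) K 0 (N - 1) = pvL K (N - 1) := by
      rw [pvALoop_eq K hK1 (N.toNat + 1) 0 (N - 1) (by push_cast; omega)]
      simp
    have hget : PySem.List.pyGet? (PySem.List.pyRange 0 N 1) (pvL K (N - 1)) =
        some (pvL K (N - 1)) := by
      rw [PySem.List.pyGet?_of_nonneg _ (show (0:Int) ≤ pvL K (N - 1) by omega),
        PySem.List.pyRange_one]
      rw [List.getElem?_map]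
      rw [List.getElem?_range (by omega : (pvL K (N-1)).toNat < ((N:Int) - 0).toNat)]
      simp
      omega
    rw [distributeTicket, hloop, hget]
    simp only [distributeTicket_alt, if_neg (by omega : ¬ N ≤ 1), Option.getD_some]
    unfold pvL
    rw [if_neg (by omega : ¬ (N - 1 : Int) ≤ 0)]
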